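-- pv_equiv track=rewrite | github.com/rprusak/Advent-of-code-2018 | 7/main.py | find_start_steps
-- ===== SOURCE A (Python) =====
-- from typing import List, Tuple, Dict
--
-- def find_start_steps(steps_connections: List[Tuple[str, str]]) -> List[str]:
--     start_steps = set([x for t in steps_connections for x in t])
--
--     for step in steps_connections:
--         if step[1] in start_steps:
--             start_steps.remove(step[1])
--
--     start_steps = list(start_steps)
--     start_steps.sort()
--
--     return start_steps
-- ===== SOURCE B (Python) =====
-- def find_start_steps(steps_connections):
--     names = sorted({x for t in steps_connections for x in t})
--     targets = sorted({b for _, b in steps_connections})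
--     result = []
--     i = 0
--     for name in names:
--         while i < len(targets) and targets[i] < name:
--             i += 1
--         if i == len(targets) or targets[i] != name:
--             result.append(name)
--     return result
-- ===== Notes on version B (the rewrite author's own statement) =====
-- stated objective: alternative
-- what changed: Instead of pruning a hash set of names and sorting the remainder, B sorts the distinct names and the distinct targets and emits the set difference in order by a two-pointer merge scan, so the output is built already sorted.
import Mathlib
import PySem

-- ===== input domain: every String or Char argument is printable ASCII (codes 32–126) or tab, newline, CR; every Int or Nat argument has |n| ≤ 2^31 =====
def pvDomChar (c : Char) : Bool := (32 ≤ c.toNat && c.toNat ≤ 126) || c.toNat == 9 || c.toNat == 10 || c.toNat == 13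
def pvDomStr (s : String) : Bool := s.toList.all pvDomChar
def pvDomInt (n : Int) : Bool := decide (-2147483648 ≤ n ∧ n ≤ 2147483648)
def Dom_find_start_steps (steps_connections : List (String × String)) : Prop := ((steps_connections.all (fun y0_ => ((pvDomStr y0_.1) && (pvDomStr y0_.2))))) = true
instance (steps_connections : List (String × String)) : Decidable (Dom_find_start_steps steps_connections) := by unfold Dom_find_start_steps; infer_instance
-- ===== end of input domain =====

-- B sorts the distinct names and the distinct targets and builds the answer already in order by a two-pointer merge-difference scan, instead of A's prune-a-set-then-sort (same cost, different algorithm).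


-- ===== PORT A =====
def find_start_steps (steps_connections : List (String × String)) : List String :=
  let start_steps : PySem.Set String :=
    PySem.Set.ofList (steps_connections.flatMap (fun t => [t.1, t.2]))
  let start_steps :=
    steps_connections.foldl
      (fun s step => if PySem.Set.contains s step.2 then PySem.Set.discard s step.2 else s)
      start_steps
  PySem.List.sorted start_steps (fun x => x) false

-- ===== PORT B =====
-- the 'while i < len(targets) and targets[i] < name: i += 1' loop
def fssAdvance (targets : List String) (name : String) (i : Nat) : Nat :=
  if h : i < targets.length then
    if targets[i] < name then fssAdvance targets name (i + 1) else i
  else i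
termination_by targets.length - i

def find_start_steps_alt (steps_connections : List (String × String)) : List String :=
  let names := PySem.List.sorted
    (PySem.Set.ofList (steps_connections.flatMap (fun t => [t.1, t.2]))) (fun x => x) false
  let targets := PySem.List.sorted
    (PySem.Set.ofList (steps_connections.map (·.2))) (fun x => x) false
  let st := names.foldl
    (fun (acc : List String × Nat) name =>
      let i := fssAdvance targets name acc.2
      if i = targets.length ∨ ¬ targets.getD i "" = name then (acc.1 ++ [name], i)
      else (acc.1, i))
    ([], 0)
  st.1

-- ===== PRECONDITION & SPEC =====
def Spec_find_start_steps (steps_connections : List (String × String)) (out : List String) : Prop := out = find_start_steps_alt steps_connections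
instance (steps_connections : List (String × String)) (out : List String) : Decidable (Spec_find_start_steps steps_connections out) := by unfold Spec_find_start_steps; infer_instance

-- ===== CLAIM (what is proved, stated in full; the proofs are below) =====
def Claim_equal_find_start_steps : Prop := ∀ (steps_connections : List (String × String)), Dom_find_start_steps steps_connections → Spec_find_start_steps steps_connections (find_start_steps steps_connections)

-- ===== LEMMAS AND PROOFS =====

-- A's pruning loop: membership after all guarded removals
lemma mem_foldl_discard (conns : List (String × String)) (s : PySem.Set String) (y : String) :
    (y ∈ conns.foldl
        (fun s step => if PySem.Set.contains s step.2 then PySem.Set.discard s step.2 else s) s)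
    ↔ (y ∈ s ∧ ∀ p ∈ conns, y ≠ p.2) := by
  induction conns generalizing s with
  | nil => simp
  | cons p t ih =>
    simp only [List.foldl_cons, ih, List.mem_cons]
    by_cases h : PySem.Set.contains s p.2
    · simp only [h, if_pos, PySem.Set.mem_discard]
      constructor
      · rintro ⟨⟨hy, hne⟩, hall⟩
        exact ⟨hy, by rintro q (rfl | hq); exact hne; exact hall q hq⟩
      · rintro ⟨hy, hall⟩
        exact ⟨⟨hy, hall p (Or.inl rfl)⟩, fun q hq => hall q (Or.inr hq)⟩
    · simp only [h, if_neg, Bool.false_eq_true, not_false_iff]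
      have hns : p.2 ∉ s := by
        intro hmem
        exact h ((PySem.Set.contains_iff s p.2).mpr hmem)
      constructor
      · rintro ⟨hy, hall⟩
        refine ⟨hy, ?_⟩
        rintro q (rfl | hq)
        · exact fun he => hns (he ▸ hy)
        · exact hall q hq
      · rintro ⟨hy, hall⟩
        exact ⟨hy, fun q hq => hall q (Or.inr hq)⟩

lemma nodup_foldl_discard (conns : List (String × String)) (s : PySem.Set String)
    (hs : s.Nodup) :
    (conns.foldl
        (fun s step => if PySem.Set.contains s step.2 then PySem.Set.discard s step.2 else s) s).Nodup := by
  induction conns generalizing s with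
  | nil => exact hs
  | cons p t ih =>
    simp only [List.foldl_cons]
    apply ih
    by_cases h : PySem.Set.contains s p.2
    · simp only [if_pos h]
      exact PySem.Set.nodup_discard s p.2 hs
    · simp only [if_neg h]
      exact hs

-- the advance loop: it only moves forward over entries < name, and stops at length or at an entry not < name
lemma fssAdvance_spec (targets : List String) (name : String) (i : Nat) :
    i ≤ fssAdvance targets name i ∧
    (i ≤ targets.length → fssAdvance targets name i ≤ targets.length) ∧
    (∀ j, i ≤ j → ∀ hj : j < targets.length, j < fssAdvance targets name i → targets[j] < name) ∧
    (∀ hj : fssAdvance targets name i < targets.length, ¬ targets[fssAdvance targets name i] < name) := by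
  induction i using (fssAdvance.induct targets name) with
  | case1 i h hlt ih =>
    rw [fssAdvance, dif_pos h, if_pos hlt]
    obtain ⟨h1, h2, h3, h4⟩ := ih
    refine ⟨by omega, fun _ => h2 (by omega), ?_, h4⟩
    intro j hij hj hlt'
    rcases Nat.eq_or_lt_of_le hij with rfl | hij'
    · exact hlt
    · exact h3 j hij' hj hlt'
  | case2 i h hlt =>
    rw [fssAdvance, dif_pos h, if_neg hlt]
    exact ⟨le_refl _, fun _ => le_of_lt h, fun j hij hj hlt' => absurd hlt' (by omega), fun _ => hlt⟩
  | case3 i h =>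
    rw [fssAdvance, dif_neg h]
    exact ⟨le_refl _, fun hi => hi, fun j hij hj hlt' => absurd hlt' (by omega),
           fun hj => absurd hj h⟩

-- the merge-difference fold computes append of a filter, under the two-pointer invariant
lemma foldl_merge_filter (targets : List String) (ht : targets.Pairwise (· < ·)) :
    ∀ (names : List String) (acc : List String) (i : Nat),
      names.Pairwise (· < ·) →
      i ≤ targets.length →
      (∀ j, (hj : j < targets.length) → j < i → ∀ n ∈ names, targets[j] < n) →
      (names.foldl
        (fun (acc : List String × Nat) name =>
          let i := fssAdvance targets name acc.2
          if i = targets.length ∨ ¬ targets.getD i "" = name then (acc.1 ++ [name], i)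
          else (acc.1, i))
        (acc, i)).1
      = acc ++ names.filter (fun n => ¬ n ∈ targets) := by
  intro names
  induction names with
  | nil => simp
  | cons name rest ih =>
    intro acc i hpw hile hinv
    simp only [List.foldl_cons, List.filter_cons]
    set i' := fssAdvance targets name i with hi'
    obtain ⟨hle, hlen', hmid, hstop⟩ := fssAdvance_spec targets name i
    have hlen : i' ≤ targets.length := hlen' hile
    -- below i' everything is < name
    have hbelow : ∀ j, (hj : j < targets.length) → j < i' → targets[j] < name := by
      intro j hj hji
      by_cases hcase : j < i
      · exact hinv j hj hcase name (List.mem_cons_self)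
      · exact hmid j (by omega) hj hji
    -- the test decides membership of name in targets
    have htest : (i' = targets.length ∨ ¬ targets.getD i' "" = name) ↔ ¬ name ∈ targets := by
      constructor
      · rintro (heq | hne) hmem
        · obtain ⟨j, hj, hv⟩ := List.mem_iff_getElem.mp hmem
          exact absurd (hv ▸ hbelow j hj (by omega)) (lt_irrefl name)
        · obtain ⟨j, hj, hv⟩ := List.mem_iff_getElem.mp hmem
          rcases lt_trichotomy j i' with hlt | rfl | hgt
          · exact absurd (hv ▸ hbelow j hj hlt) (lt_irrefl name)
          · exact hne (by rw [List.getD_eq_getElem targets "" hj, hv])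
          · -- targets[i'] < targets[j] = name contradicts the stop condition
            have hi'len : i' < targets.length := by omega
            have : targets[i'] < targets[j] :=
              List.pairwise_iff_getElem.mp ht i' j hi'len hj hgt
            rw [hv] at this
            exact hstop hi'len this
      · intro hnmem
        by_cases heq : i' = targets.length
        · exact Or.inl heq
        · refine Or.inr (fun hv => hnmem ?_)
          have hi'len : i' < targets.length := lt_of_le_of_ne hlen heq
          rw [List.getD_eq_getElem targets "" hi'len] at hv
          exact hv ▸ List.getElem_mem hi'len
    -- invariant for the tail: everything below i' is < name < every element of rest
    have hinv' : ∀ j, (hj : j < targets.length) → j < i' → ∀ n ∈ rest, targets[j] < n := by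
      intro j hj hji n hn
      have h1 : targets[j] < name := hbelow j hj hji
      have h2 : name < n := (List.pairwise_cons.mp hpw).1 n hn
      exact lt_trans h1 h2
    have hpw' : rest.Pairwise (· < ·) := (List.pairwise_cons.mp hpw).2
    by_cases hmem : name ∈ targets
    · have : ¬ (i' = targets.length ∨ ¬ targets.getD i' "" = name) := fun h => htest.mp h hmem
      simp only [this, if_neg, not_false_iff, hmem, not_true]
      rw [ih acc i' hpw' hlen hinv']
      simp
    · have : (i' = targets.length ∨ ¬ targets.getD i' "" = name) := htest.mpr hmem
      simp only [this, if_pos, hmem, not_false_iff]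
      rw [ih (acc ++ [name]) i' hpw' hlen hinv']
      simp

-- ===== VERDICT (by name: the statement is the Claim_ definition above) =====
theorem find_start_steps_spec : Claim_equal_find_start_steps := by
  intro conns _
  unfold Spec_find_start_steps find_start_steps find_start_steps_alt
  simp only
  set names := PySem.List.sorted
    (PySem.Set.ofList (conns.flatMap (fun t => [t.1, t.2]))) (fun x => x) false with hnames
  set targets := PySem.List.sorted
    (PySem.Set.ofList (conns.map (·.2))) (fun x => x) false with htargets
  have hnpw : names.Pairwise (· < ·) := PySem.List.sorted_ofList_pairwise_lt _
  have htpw : targets.Pairwise (· < ·) := PySem.List.sorted_ofList_pairwise_lt _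
  rw [foldl_merge_filter targets htpw names [] 0 hnpw (by omega) (fun j hj hj0 => absurd hj0 (by omega))]
  rw [List.nil_append]
  -- B's result is the filtered sorted name list; show A's sort returns exactly it
  set X := conns.foldl
      (fun s step => if PySem.Set.contains s step.2 then PySem.Set.discard s step.2 else s)
      (PySem.Set.ofList (conns.flatMap (fun t => [t.1, t.2]))) with hX
  set Y := names.filter (fun n => ¬ n ∈ targets) with hY
  have hYsub : Y.Sublist names := List.filter_sublist
  have hYpw : Y.Pairwise (· < ·) := hnpw.sublist hYsub
  have hXn : X.Nodup := nodup_foldl_discard _ _ (PySem.Set.nodup_ofList _)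
  have hYn : Y.Nodup := hYpw.nodup
  have hperm : Y.Perm X := by
    refine (List.perm_ext_iff_of_nodup hYn hXn).mpr ?_
    intro y
    rw [hY, List.mem_filter, hX, mem_foldl_discard]
    have hmn : y ∈ names ↔ ∃ p ∈ conns, y = p.1 ∨ y = p.2 := by
      rw [hnames, PySem.List.mem_sorted, PySem.Set.mem_ofList]
      simp only [List.mem_flatMap, List.mem_cons]
      aesop
    have hmt : y ∈ targets ↔ ∃ p ∈ conns, y = p.2 := by
      rw [htargets, PySem.List.mem_sorted, PySem.Set.mem_ofList]
      simp only [List.mem_map]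
      aesop
    constructor
    · rintro ⟨hyn, hyt⟩
      refine ⟨(PySem.Set.mem_ofList _ _).mpr ?_, ?_⟩
      · obtain ⟨p, hp, hor⟩ := hmn.mp hyn
        exact List.mem_flatMap.mpr ⟨p, hp, by rcases hor with rfl | rfl <;> simp⟩
      · intro p hp he
        exact (by simpa using hyt : ¬ y ∈ targets) (hmt.mpr ⟨p, hp, he⟩)
    · rintro ⟨hyin, hall⟩
      have hyn : y ∈ names := by
        rw [hmn]
        obtain ⟨p, hp, hor⟩ := by
          have := (PySem.Set.mem_ofList _ _).mp hyin
          exact List.mem_flatMap.mp this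
        simp only [List.mem_cons, List.not_mem_nil, or_false] at hor
        exact ⟨p, hp, hor⟩
      refine ⟨hyn, ?_⟩
      simp only [decide_not, Bool.not_eq_true', decide_eq_false_iff_not]
      rw [hmt]
      rintro ⟨p, hp, rfl⟩
      exact hall p hp rfl
  exact PySem.List.sorted_eq_of_perm_of_pairwise_lt X Y (fun x => x) hperm hYpw
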